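-- pv_equiv track=rewrite | github.com/jaredap1995/LeetCode | Python/Medium/prefix/suffix/findPolygonwithLargestPerimiter.py | solution
-- ===== SOURCE A (Python) =====
-- def solution(nums):
--     nums.sort()
--     res = 0
--     prefix_sum = nums[0]+nums[1]
--     for num in nums:
--         if prefix_sum > num:
--             res = prefix_sum + num
--         prefix_sum += num
--
--     return res
-- ===== SOURCE B (Python) =====
-- def solution(nums):
--     # Sorts nums in place like A; equivalence is about the return value.
--     nums.sort()
--     base = nums[0] + nums[1]
--     prefix = []
--     acc = 0
--     for v in nums:
--         prefix.append(acc)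
--         acc += v
--     for i in range(len(nums) - 1, -1, -1):
--         if base + prefix[i] > nums[i]:
--             return base + prefix[i] + nums[i]
--     return 0
-- ===== Notes on version B (the rewrite author's own statement) =====
-- stated objective: alternative
-- what changed: A keeps a running prefix sum and overwrites res at every satisfying index in one forward pass; B precomputes a prefix-sum table and then scans backwards, returning at the first satisfying index from the end (the same value A's last overwrite leaves).
import Mathlib
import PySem

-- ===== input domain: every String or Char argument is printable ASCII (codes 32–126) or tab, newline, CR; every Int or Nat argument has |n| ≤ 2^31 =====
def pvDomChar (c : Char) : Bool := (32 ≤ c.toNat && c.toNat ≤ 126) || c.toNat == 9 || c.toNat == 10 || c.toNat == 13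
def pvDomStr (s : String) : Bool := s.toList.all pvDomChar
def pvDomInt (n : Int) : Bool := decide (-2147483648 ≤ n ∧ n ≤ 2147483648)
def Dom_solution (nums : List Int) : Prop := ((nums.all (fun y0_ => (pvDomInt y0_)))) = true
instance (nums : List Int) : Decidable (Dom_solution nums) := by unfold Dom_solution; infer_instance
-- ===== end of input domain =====

-- B replaces A's single forward pass (running prefix sum, last match overwrites res) by a
-- precomputed prefix-sum table scanned backwards, returning at the first match from the end.
-- A sorts nums in place; B performs the same mutation; the equivalence is about the return value.

-- ===== PORT A =====
def solution (nums : List Int) : Int :=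
  let s := PySem.List.sorted nums (fun x => x) false
  match PySem.List.pyGet? s 0, PySem.List.pyGet? s 1 with
  | some a, some b =>
      (s.foldl (fun (st : Int × Int) num =>
          ((if st.2 > num then st.2 + num else st.1), st.2 + num)) (0, a + b)).1
  | _, _ => 0   -- IndexError in Python; excluded by Pre_solution

-- ===== PORT B =====
-- the prefix table paired with the elements: (sum of earlier elements, element)
def prefixPairs (acc : Int) : List Int → List (Int × Int)
  | [] => []
  | v :: t => (acc, v) :: prefixPairs (acc + v) t

def solution_alt (nums : List Int) : Int :=
  let s := PySem.List.sorted nums (fun x => x) false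
  match PySem.List.pyGet? s 0 with
  | none => 0   -- IndexError in Python; excluded by Pre_solution
  | some a =>
    match PySem.List.pyGet? s 1 with
    | none => 0   -- IndexError in Python; excluded by Pre_solution
    | some b =>
      let base := a + b
      match (prefixPairs 0 s).reverse.find? (fun p => decide (base + p.1 > p.2)) with
      | some p => base + p.1 + p.2
      | none => 0

-- ===== PRECONDITION & SPEC =====
-- Pre_ excludes exactly the inputs with fewer than 2 elements, where both Pythons raise IndexError.
def Pre_solution (nums : List Int) : Prop := 2 ≤ nums.length
instance (nums : List Int) : Decidable (Pre_solution nums) := by unfold Pre_solution; infer_instance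
def pvWitness_solution : List Int := [1, 2, 3]

def Spec_solution (nums : List Int) (out : Int) : Prop := out = solution_alt nums
instance (nums : List Int) (out : Int) : Decidable (Spec_solution nums out) := by unfold Spec_solution; infer_instance

-- ===== CLAIM (what is proved, stated in full; the proofs are below) =====
def Claim_equal_solution : Prop := ∀ (nums : List Int), Dom_solution nums → Pre_solution nums → Spec_solution nums (solution nums)

-- ===== LEMMAS AND PROOFS =====

-- a last-match foldl equals the first match of the reversed list
theorem foldl_last_match (c : Int × Int → Bool) (f : Int × Int → Int) :
    ∀ (l : List (Int × Int)) (r0 : Int),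
      l.foldl (fun r p => if c p then f p else r) r0 =
        (match l.reverse.find? c with | some p => f p | none => r0) := by
  intro l
  induction l with
  | nil => intro r0; simp
  | cons p t ih =>
      intro r0
      simp only [List.foldl_cons, List.reverse_cons, List.find?_append, ih]
      cases h : t.reverse.find? c with
      | some q => simp
      | none =>
          cases hc : c p <;> simp [List.find?, hc]

-- A's pair-state fold over the elements equals the plain fold over the prefix table
theorem fold_pair (base : Int) :
    ∀ (l : List Int) (acc res : Int),
      (l.foldl (fun (st : Int × Int) num =>
          ((if st.2 > num then st.2 + num else st.1), st.2 + num)) (res, base + acc)).1 =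
        (prefixPairs acc l).foldl
          (fun r p => if decide (base + p.1 > p.2) = true then base + p.1 + p.2 else r) res := by
  intro l
  induction l with
  | nil => intro acc res; simp [prefixPairs]
  | cons v t ih =>
      intro acc res
      have hadd : base + acc + v = base + (acc + v) := by ring
      simp only [prefixPairs, List.foldl_cons, hadd, ih]
      by_cases h : base + acc > v <;> simp [h]

theorem solution_eq_alt (nums : List Int) (h : 2 ≤ nums.length) :
    solution nums = solution_alt nums := by
  unfold solution solution_alt
  have hlen : (PySem.List.sorted nums (fun x => x) false).length = nums.length :=
    PySem.List.length_sorted ..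
  obtain ⟨a, b, t, hs⟩ :
      ∃ a b t, PySem.List.sorted nums (fun x => x) false = a :: b :: t := by
    rcases e : PySem.List.sorted nums (fun x => x) false with _ | ⟨a, _ | ⟨b, t⟩⟩ <;>
      first
        | exact ⟨a, b, t, rfl⟩
        | (exfalso; rw [e] at hlen; simp at hlen; omega)
  rw [hs]
  simp only [PySem.List.pyGet?_zero_cons]
  have h1 : PySem.List.pyGet? (a :: b :: t) 1 = some b := by
    simp [PySem.List.pyGet?, PySem.List.pyIdx?]
  rw [h1]
  have hb := fold_pair (a + b) (a :: b :: t) 0 0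
  rw [foldl_last_match] at hb
  simpa using hb

-- ===== VERDICT (by name: the statement is the Claim_ definition above) =====
theorem solution_spec : Claim_equal_solution := by
  intro nums _ hpre
  exact solution_eq_alt nums hpre
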